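-- pv_equiv track=rewrite | github.com/IhorShliakhetka/lab1-Shliakhetka-IR-12 | trup.py | time_to_target
-- ===== SOURCE A (Python) =====
-- def move_time(a, b):
--     di = abs(a[0] - b[0])
--     dj = abs(a[1] - b[1])
--
--     if di == 1 and dj == 1:
--         return 2
--     return 1
--
-- def time_to_target(path, target):
--     time = 0
--
--     for i in range(len(path)):
--         if path[i] == target:
--             return time
--
--         if i + 1 < len(path):
--             time += move_time(path[i], path[i + 1])
--
--     return None
-- ===== SOURCE B (Python) =====
-- def move_time(a, b):
--     di = abs(a[0] - b[0])
--     dj = abs(a[1] - b[1])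
--
--     if di == 1 and dj == 1:
--         return 2
--     return 1
--
-- def time_to_target(path, target):
--     # prefix sums: arrival time at every step of the path
--     times = [0]
--     for a, b in zip(path, path[1:]):
--         times.append(times[-1] + move_time(a, b))
--     # hash index: first arrival time of each cell
--     arrival = {}
--     for cell, t in zip(path, times):
--         arrival.setdefault(cell, t)
--     return arrival.get(target)
-- ===== Notes on version B (the rewrite author's own statement) =====
-- stated objective: alternative
-- what changed: Replaces A's early-return scan with an interleaved accumulator by two staged constructions: a prefix-sum table of arrival times over consecutive pairs, and a first-occurrence hash index from cell to arrival time, answered by one dict lookup.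
import Mathlib
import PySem

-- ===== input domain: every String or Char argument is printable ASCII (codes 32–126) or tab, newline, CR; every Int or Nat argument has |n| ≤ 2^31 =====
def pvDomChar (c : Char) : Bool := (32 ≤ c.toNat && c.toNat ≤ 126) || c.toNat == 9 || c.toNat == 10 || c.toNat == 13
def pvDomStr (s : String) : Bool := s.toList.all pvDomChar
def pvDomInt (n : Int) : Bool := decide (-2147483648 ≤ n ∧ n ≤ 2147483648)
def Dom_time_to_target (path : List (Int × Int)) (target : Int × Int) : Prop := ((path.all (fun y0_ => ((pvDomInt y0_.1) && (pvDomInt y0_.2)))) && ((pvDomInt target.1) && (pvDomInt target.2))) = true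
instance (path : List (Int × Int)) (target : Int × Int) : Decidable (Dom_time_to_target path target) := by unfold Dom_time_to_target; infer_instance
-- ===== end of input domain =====

-- B builds a prefix-sum table of arrival times and a first-occurrence cell→time hash index, answered by one lookup, instead of A's early-return scan with an interleaved accumulator; alternative algorithm, same cost.


-- ===== PORT A =====
def move_time (a b : Int × Int) : Int :=
  let di := |a.1 - b.1|
  let dj := |a.2 - b.2|
  if di = 1 ∧ dj = 1 then 2 else 1

-- A's loop: at step i check path[i] = target (return time), then if i+1 < len add move_time path[i] path[i+1]
def time_to_target_loop : List (Int × Int) → (Int × Int) → Int → Option Int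
  | [], _, _ => none
  | p :: rest, target, time =>
      if p = target then some time
      else
        match rest with
        | [] => none                                   -- i + 1 = len: nothing added, loop ends, return None
        | q :: _ => time_to_target_loop rest target (time + move_time p q)

def time_to_target (path : List (Int × Int)) (target : Int × Int) : Option Int :=
  time_to_target_loop path target 0

-- ===== PORT B =====
def time_to_target_alt (path : List (Int × Int)) (target : Int × Int) : Option Int :=
  -- times = [0]; for a, b in zip(path, path[1:]): times.append(times[-1] + move_time(a, b))
  let times : List Int :=
    (path.zip path.tail).foldl
      (fun ts ab => ts ++ [ts.getLast! + move_time ab.1 ab.2]) [0]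
  -- arrival = {}; for cell, t in zip(path, times): arrival.setdefault(cell, t)
  let arrival : PySem.Dict (Int × Int) Int :=
    (path.zip times).foldl (fun d ct => d.setdefault ct.1 ct.2) PySem.Dict.empty
  arrival.get? target

-- ===== PRECONDITION & SPEC =====
def Spec_time_to_target (path : List (Int × Int)) (target : Int × Int) (out : Option Int) : Prop := out = time_to_target_alt path target
instance (path : List (Int × Int)) (target : Int × Int) (out : Option Int) : Decidable (Spec_time_to_target path target out) := by unfold Spec_time_to_target; infer_instance

-- ===== CLAIM =====
def Claim_equal_time_to_target : Prop := ∀ (path : List (Int × Int)) (target : Int × Int), Dom_time_to_target path target → Spec_time_to_target path target (time_to_target path target)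

-- ===== LEMMAS AND PROOFS =====

-- cost associated with one consecutive pair
def pairCost (ab : (Int × Int) × (Int × Int)) : Int := move_time ab.1 ab.2

-- sum of the first k pair costs of path
def prefCost (path : List (Int × Int)) (k : Nat) : Int :=
  (((path.zip path.tail).take k).map pairCost).sum

theorem prefCost_cons (p q : Int × Int) (rs : List (Int × Int)) (k : Nat) :
    prefCost (p :: q :: rs) (k + 1) = move_time p q + prefCost (q :: rs) k := by
  simp [prefCost, pairCost]

-- A's loop in closed form
theorem loop_eq (path : List (Int × Int)) (target : Int × Int) :
    ∀ time : Int, time_to_target_loop path target time =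
      (match PySem.List.index? path target with
       | none => none
       | some k => some (time + prefCost path k)) := by
  induction path with
  | nil => intro time; simp [time_to_target_loop, PySem.List.index?]
  | cons p rest ih =>
    intro time
    by_cases hpt : p = target
    · subst hpt
      rw [PySem.List.index?_cons_self]
      simp [time_to_target_loop, prefCost]
    · rw [PySem.List.index?_cons_of_ne rest hpt]
      match rest with
      | [] =>
        simp [time_to_target_loop, hpt, PySem.List.index?]
      | q :: rs =>
        have hstep : time_to_target_loop (p :: q :: rs) target time =
            time_to_target_loop (q :: rs) target (time + move_time p q) := by
          rw [time_to_target_loop]; simp [hpt]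
        rw [hstep, ih]
        cases hidx : PySem.List.index? (q :: rs) target with
        | none => simp
        | some k => simp [prefCost_cons, add_assoc]

-- the running prefix sums produced by B's first loop
def scanFrom (t : Int) : List ((Int × Int) × (Int × Int)) → List Int
  | [] => []
  | ab :: rs => (t + pairCost ab) :: scanFrom (t + pairCost ab) rs

theorem times_fold_eq (l : List ((Int × Int) × (Int × Int))) :
    ∀ (acc : List Int), acc ≠ [] →
      l.foldl (fun ts ab => ts ++ [ts.getLast! + move_time ab.1 ab.2]) acc =
        acc ++ scanFrom acc.getLast! l := by
  induction l with
  | nil => intro acc _; simp [scanFrom]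
  | cons ab rs ih =>
    intro acc hacc
    have hne : acc ++ [acc.getLast! + move_time ab.1 ab.2] ≠ [] := by simp
    rw [List.foldl_cons, ih _ hne]
    have hlast : (acc ++ [acc.getLast! + move_time ab.1 ab.2]).getLast! =
        acc.getLast! + move_time ab.1 ab.2 := by
      simp [List.getLast!_eq_getLast?_getD]
    rw [hlast]
    simp [scanFrom, pairCost]

-- B's second loop: first-occurrence dict lookup = first match in the pair list
theorem dict_fold_get? (pairs : List ((Int × Int) × Int)) :
    ∀ (d : PySem.Dict (Int × Int) Int) (target : Int × Int),
      (pairs.foldl (fun d ct => d.setdefault ct.1 ct.2) d).get? target =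
        ((d.get? target).or ((pairs.find? (fun ct => ct.1 == target)).map (·.2))) := by
  induction pairs with
  | nil => intro d target; simp
  | cons ct rest ih =>
    intro d target
    rw [List.foldl_cons, ih]
    by_cases hc : ct.1 = target
    · subst hc
      have h1 : (d.setdefault ct.1 ct.2).get? ct.1 = some ((d.get? ct.1).getD ct.2) :=
        PySem.Dict.get?_setdefault_self d ct.1 ct.2
      rw [h1]
      cases hd : d.get? ct.1 with
      | none => simp [List.find?]
      | some v => simp [List.find?]
    · have h1 : (d.setdefault ct.1 ct.2).get? target = d.get? target :=
        PySem.Dict.get?_setdefault_of_ne d ct.2 (fun h => hc h.symm)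
      rw [h1]
      have hb : (ct.1 == target) = false := by simpa using hc
      have hfind : (ct :: rest).find? (fun ct => ct.1 == target) =
          rest.find? (fun ct => ct.1 == target) := by
        simp [List.find?, hb]
      rw [hfind]

-- first match in zip path times = index? into path, looked up in times
theorem find_zip_eq (target : Int × Int) :
    ∀ (path : List (Int × Int)) (times : List Int),
      (((path.zip times).find? (fun ct => ct.1 == target)).map (·.2)) =
        (PySem.List.index? path target).bind (times[·]?) := by
  intro path
  induction path with
  | nil => intro times; simp [PySem.List.index?]
  | cons p ps ih =>
    intro times
    cases times with
    | nil =>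
      simp only [List.zip_nil_right, List.find?_nil, Option.map_none]
      cases h : PySem.List.index? (p :: ps) target with
      | none => rfl
      | some k => simp
    | cons t ts =>
      by_cases hpt : p = target
      · subst hpt
        rw [PySem.List.index?_cons_self]
        simp
      · rw [PySem.List.index?_cons_of_ne ps hpt]
        have hb : ((p, t).1 == target) = false := by simpa using hpt
        have hfind : ((p, t) :: ps.zip ts).find? (fun ct => ct.1 == target) =
            (ps.zip ts).find? (fun ct => ct.1 == target) := by
          simp [List.find?, hb]
        simp only [List.zip_cons_cons, hfind, ih ts]
        cases h : PySem.List.index? ps target with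
        | none => rfl
        | some k => simp

-- the prefix-sum list evaluated at an in-range index
theorem scan_get (k : Nat) :
    ∀ (l : List ((Int × Int) × (Int × Int))) (t : Int), k ≤ l.length →
      (t :: scanFrom t l)[k]? = some (t + ((l.take k).map pairCost).sum) := by
  induction k with
  | zero => intro l t _; simp
  | succ k ih =>
    intro l t hk
    cases l with
    | nil => simp at hk
    | cons ab rs =>
      have hk' : k ≤ rs.length := by simpa using hk
      show (scanFrom t (ab :: rs))[k]? = _
      rw [scanFrom.eq_def]
      rw [ih rs (t + pairCost ab) hk']
      simp [add_assoc]

-- ===== VERDICT =====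
theorem time_to_target_spec : Claim_equal_time_to_target := by
  intro path target _
  unfold Spec_time_to_target time_to_target time_to_target_alt
  rw [loop_eq]
  rw [times_fold_eq (path.zip path.tail) [0] (by simp)]
  simp only [List.getLast!_eq_getLast?_getD, List.getLast?_singleton, Option.getD_some,
    List.singleton_append]
  rw [dict_fold_get? (path.zip (0 :: scanFrom 0 (path.zip path.tail))) PySem.Dict.empty target]
  simp only [PySem.Dict.get?_empty, Option.none_or]
  rw [find_zip_eq]
  cases hidx : PySem.List.index? path target with
  | none => rfl
  | some k =>
    obtain ⟨hklt, -, -⟩ := PySem.List.getElem_of_index?_eq_some hidx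
    have hk : k ≤ (path.zip path.tail).length := by
      simp [List.length_zip]
      omega
    simp only [Option.bind_some]
    rw [scan_get k (path.zip path.tail) 0 hk]
    simp [prefCost]
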